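-- pv_equiv track=rewrite | github.com/godbolts/LearningP | Ancestry.py | on_eellane
-- ===== SOURCE A (Python) =====
-- def on_eellane(sõnastik, e_nimi, t_nimi):
--     eelane = False
--     for nimi, vanem in sõnastik.items():
--         if nimi == e_nimi:
--             if t_nimi == vanem[0] or t_nimi == vanem[1]:
--                 eelane = True
--                 break
--     return eelane
-- ===== SOURCE B (Python) =====
-- def on_eellane(sõnastik, e_nimi, t_nimi):
--     # Collect every child whose (first two) recorded parents include t_nimi,
--     # then ask whether e_nimi is one of them.
--     lapsed = {nimi for nimi, vanem in sõnastik.items() if t_nimi in vanem[:2]}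
--     return e_nimi in lapsed
-- ===== Notes on version B (the rewrite author's own statement) =====
-- stated objective: alternative
-- what changed: B inverts the decomposition: instead of scanning for the key and then testing its value, it builds in one pass the set of all children whose first-two-parent slice contains t_nimi and then tests e_nimi's membership in that set; the key test and parent test swap roles and there is no early exit.
-- outside the precondition, e.g. on on_eellane({'a': []}, 'a', 'x'): A raises IndexError, B returns False; on on_eellane({'a': ['z']}, 'a', 'x'): A raises IndexError, B returns False
import Mathlib
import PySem

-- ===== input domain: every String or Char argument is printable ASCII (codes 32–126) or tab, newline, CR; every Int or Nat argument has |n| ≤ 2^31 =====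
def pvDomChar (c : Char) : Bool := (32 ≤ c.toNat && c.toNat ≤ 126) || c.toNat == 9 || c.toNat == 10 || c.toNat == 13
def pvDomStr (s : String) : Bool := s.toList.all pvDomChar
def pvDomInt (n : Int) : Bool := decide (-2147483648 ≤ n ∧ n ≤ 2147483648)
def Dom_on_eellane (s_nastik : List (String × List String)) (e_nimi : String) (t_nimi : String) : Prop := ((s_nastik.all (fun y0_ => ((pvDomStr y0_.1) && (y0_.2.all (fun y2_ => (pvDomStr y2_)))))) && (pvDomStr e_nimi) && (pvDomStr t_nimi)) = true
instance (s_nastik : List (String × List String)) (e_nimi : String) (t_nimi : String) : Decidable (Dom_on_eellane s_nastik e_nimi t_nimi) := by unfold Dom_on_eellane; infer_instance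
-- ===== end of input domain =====

-- B inverts A's decomposition: one pass building the set of children whose first-two-parent
-- slice contains t_nimi, then a membership test of e_nimi (objective: alternative; same cost).

-- ===== PORT A =====
-- A's loop over sõnastik.items(): on a key match tests vanem[0]/vanem[1] and breaks on success.
-- vanem[0]/vanem[1] are PySem.List.pyGet?; 'none' is Python's IndexError, excluded by Pre_.
def on_eellane_go (e_nimi t_nimi : String) : List (String × List String) → Bool
  | [] => false
  | (nimi, vanem) :: rest =>
    if nimi == e_nimi then
      match PySem.List.pyGet? vanem 0 with
      | none => false  -- IndexError, outside Pre_
      | some v0 =>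
        if t_nimi == v0 then true
        else
          match PySem.List.pyGet? vanem 1 with
          | none => false  -- IndexError, outside Pre_
          | some v1 =>
            if t_nimi == v1 then true
            else on_eellane_go e_nimi t_nimi rest
    else on_eellane_go e_nimi t_nimi rest

def on_eellane (s_nastik : List (String × List String)) (e_nimi : String) (t_nimi : String) : Bool :=
  on_eellane_go e_nimi t_nimi s_nastik

-- ===== PORT B =====
-- {nimi for nimi, vanem in sõnastik.items() if t_nimi in vanem[:2]} then 'e_nimi in lapsed'.
def on_eellane_alt (s_nastik : List (String × List String)) (e_nimi : String) (t_nimi : String) : Bool :=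
  let lapsed : PySem.Set String :=
    PySem.Set.ofList
      ((s_nastik.filter (fun p => (PySem.List.slice p.2 none (some 2)).contains t_nimi)).map Prod.fst)
  PySem.Set.contains lapsed e_nimi

-- ===== PRECONDITION & SPEC =====
-- Pre_ excludes (a) inputs where A raises IndexError (an entry for e_nimi whose value is empty,
-- or has length 1 and its single element ≠ t_nimi), and (b) association lists with duplicate keys,
-- which cannot arise from a Python dict.
def Pre_on_eellane (s_nastik : List (String × List String)) (e_nimi : String) (t_nimi : String) : Prop :=
  (s_nastik.map Prod.fst).Nodup ∧
  ∀ p ∈ s_nastik, p.1 = e_nimi → (p.2 ≠ [] ∧ (p.2.head? = some t_nimi ∨ 2 ≤ p.2.length))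
instance (s_nastik : List (String × List String)) (e_nimi : String) (t_nimi : String) : Decidable (Pre_on_eellane s_nastik e_nimi t_nimi) := by unfold Pre_on_eellane; infer_instance

def pvWitness_on_eellane : (List (String × List String)) × String × String :=
  ([("Ann", ["Mari", "Jaan"]), ("Mari", ["Tiiu", "Rein"])], "Ann", "Jaan")

def Spec_on_eellane (s_nastik : List (String × List String)) (e_nimi : String) (t_nimi : String) (out : Bool) : Prop := out = on_eellane_alt s_nastik e_nimi t_nimi
instance (s_nastik : List (String × List String)) (e_nimi : String) (t_nimi : String) (out : Bool) : Decidable (Spec_on_eellane s_nastik e_nimi t_nimi out) := by unfold Spec_on_eellane; infer_instance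

-- ===== CLAIM (what is proved, stated in full; the proofs are below) =====
def Claim_equal_on_eellane : Prop := ∀ (s_nastik : List (String × List String)) (e_nimi : String) (t_nimi : String), Dom_on_eellane s_nastik e_nimi t_nimi → Pre_on_eellane s_nastik e_nimi t_nimi → Spec_on_eellane s_nastik e_nimi t_nimi (on_eellane s_nastik e_nimi t_nimi)

-- ===== LEMMAS AND PROOFS =====

-- B's result, characterized: e_nimi is in the comprehension's set iff some entry has key
-- e_nimi and t_nimi among its first two parents.
theorem on_eellane_alt_iff (s_nastik : List (String × List String)) (e_nimi t_nimi : String) :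
    on_eellane_alt s_nastik e_nimi t_nimi = true ↔
      ∃ p ∈ s_nastik, p.1 = e_nimi ∧ t_nimi ∈ PySem.List.slice p.2 none (some 2) := by
  simp only [on_eellane_alt, PySem.Set.contains_iff, PySem.Set.mem_ofList, List.mem_map,
    List.mem_filter]
  constructor
  · rintro ⟨p, ⟨hp, hc⟩, hk⟩
    exact ⟨p, hp, hk, by simpa using hc⟩
  · rintro ⟨p, hp, hk, hm⟩
    exact ⟨p, ⟨hp, by simpa using hm⟩, hk⟩

-- If no key in the list equals e_nimi, A's scan returns false.
theorem on_eellane_go_not_mem (e_nimi t_nimi : String) (l : List (String × List String))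
    (h : ∀ p ∈ l, p.1 ≠ e_nimi) : on_eellane_go e_nimi t_nimi l = false := by
  induction l with
  | nil => rfl
  | cons hd tl ih =>
    have hhd : hd.1 ≠ e_nimi := h hd (List.mem_cons_self ..)
    obtain ⟨nimi, vanem⟩ := hd
    simp only [on_eellane_go]
    rw [if_neg (by simpa using hhd)]
    exact ih (fun p hp => h p (List.mem_cons_of_mem _ hp))

-- A's scan, characterized the same way (under Pre_).
theorem on_eellane_go_iff (s_nastik : List (String × List String)) (e_nimi t_nimi : String)
    (hnd : (s_nastik.map Prod.fst).Nodup)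
    (hpre : ∀ p ∈ s_nastik, p.1 = e_nimi → (p.2 ≠ [] ∧ (p.2.head? = some t_nimi ∨ 2 ≤ p.2.length))) :
    on_eellane_go e_nimi t_nimi s_nastik = true ↔
      ∃ p ∈ s_nastik, p.1 = e_nimi ∧ t_nimi ∈ PySem.List.slice p.2 none (some 2) := by
  induction s_nastik with
  | nil => simp [on_eellane_go]
  | cons hd tl ih =>
    obtain ⟨nimi, vanem⟩ := hd
    simp only [List.map_cons, List.nodup_cons] at hnd
    by_cases hk : nimi = e_nimi
    · subst hk
      obtain ⟨hne, hlen⟩ := hpre (nimi, vanem) (List.mem_cons_self ..) rfl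
      have hrest : on_eellane_go nimi t_nimi tl = false := by
        apply on_eellane_go_not_mem
        intro p hp hpe
        exact hnd.1 (hpe ▸ List.mem_map_of_mem hp)
      have hnotl : ∀ p ∈ tl, ¬ (p.1 = nimi ∧ t_nimi ∈ PySem.List.slice p.2 none (some 2)) := by
        rintro p hp ⟨hpe, -⟩
        exact hnd.1 (hpe ▸ List.mem_map_of_mem hp)
      have hslice : ∀ (l : List String), PySem.List.slice l none (some 2) = l.take 2 := by
        intro l
        simpa using PySem.List.slice_to_natCast l 2
      match vanem, hne with
      | v0 :: vrest, _ =>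
        simp only [List.head?] at hlen
        have g0 : PySem.List.pyGet? (v0 :: vrest) 0 = some v0 := by
          simp
        by_cases h0 : t_nimi = v0
        · simp only [on_eellane_go, BEq.rfl, if_pos, g0]
          rw [if_pos (by simpa using h0)]
          refine (iff_of_true rfl ?_)
          exact ⟨(nimi, v0 :: vrest), List.mem_cons_self .., rfl,
            by rw [hslice]; simp [h0]⟩
        · rcases hlen with h | h
          · exact absurd (Option.some.inj h).symm h0
          · match vrest, h with
            | v1 :: vtl, _ =>
              have g1 : PySem.List.pyGet? (v0 :: v1 :: vtl) 1 = some v1 := by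
                simp
              simp only [on_eellane_go, BEq.rfl, if_pos, g0, g1]
              rw [if_neg (by simpa using h0)]
              by_cases h1 : t_nimi = v1
              · rw [if_pos (by simpa using h1)]
                refine (iff_of_true rfl ?_)
                exact ⟨(nimi, v0 :: v1 :: vtl), List.mem_cons_self .., rfl,
                  by rw [hslice]; simp [h1]⟩
              · rw [if_neg (by simpa using h1), hrest]
                simp only [Bool.false_eq_true, false_iff]
                rintro ⟨p, hp, hpe, hm⟩
                rcases List.mem_cons.mp hp with rfl | hp'
                · rw [hslice] at hm
                  simp only [List.take, List.mem_cons, List.not_mem_nil, or_false] at hm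
                  rcases hm with hm | hm
                  · exact h0 hm
                  · exact h1 hm
                · exact hnotl p hp' ⟨hpe, hm⟩
    · have hbe : (nimi == e_nimi) = false := by simpa using hk
      simp only [on_eellane_go, hbe, Bool.false_eq_true, if_false]
      rw [ih hnd.2 (fun p hp => hpre p (List.mem_cons_of_mem _ hp))]
      constructor
      · rintro ⟨p, hp, h⟩; exact ⟨p, List.mem_cons_of_mem _ hp, h⟩
      · rintro ⟨p, hp, hpe, hm⟩
        rcases List.mem_cons.mp hp with rfl | hp'
        · exact absurd hpe hk
        · exact ⟨p, hp', hpe, hm⟩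

-- ===== VERDICT (by name: the statements are the Claim_ definitions above) =====
theorem on_eellane_spec : Claim_equal_on_eellane := by
  intro s e t _ hpre
  have hA := on_eellane_go_iff s e t hpre.1 hpre.2
  have hB := on_eellane_alt_iff s e t
  show on_eellane s e t = on_eellane_alt s e t
  rw [on_eellane]
  cases hb : on_eellane_alt s e t with
  | true => exact hA.mpr (hB.mp hb)
  | false =>
    by_contra h
    have := hB.mpr (hA.mp (by revert h; cases on_eellane_go e t s <;> simp))
    rw [hb] at this; exact Bool.false_ne_true this
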